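-- pv_equiv track=rewrite | github.com/TylerRConger/TSP | TSP.py | convert_to_symmetric_matrix
-- ===== SOURCE A (Python) =====
-- def convert_to_symmetric_matrix(graph):
--     """
--     Convert a 2-d representing a lower triangular matrix into a square matrix
--     This just makes it easier to index later on
--
--     Arguments:
--         graph (array): 2-d array representing adj matrix (triangular)
--
--     Returns:
--         graph (array): 2-d array representing adj matrix (square)
--     """
--     # Initialize symmetric matrix with 0
--     n = len(graph)
--     symmetric_matrix = [[0] * n for _ in range(n)]
--
--     # Fill in the upper triangular part of the matrix
--     for i in range(n):
--         for j in range(i+1, n):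
--             symmetric_matrix[i][j] = graph[j][i]
--
--     # Fill in the lower triangular part by copying the upper triangular piece
--     for i in range(n):
--         for j in range(i+1, n):
--             symmetric_matrix[j][i] = symmetric_matrix[i][j]
--
--     return symmetric_matrix
-- ===== SOURCE B (Python) =====
-- def convert_to_symmetric_matrix(graph):
--     n = len(graph)
--     # Strict lower triangle of the input, padded out to an n x n matrix with zeros.
--     lower = [[graph[i][j] if j < i else 0 for j in range(n)] for i in range(n)]
--     # The symmetric matrix is lower plus its transpose (the diagonal stays 0).
--     transposed = [list(col) for col in zip(*lower)] if n else []
--     return [[a + b for a, b in zip(row_l, row_t)] for row_l, row_t in zip(lower, transposed)]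
-- ===== Notes on version B (the rewrite author's own statement) =====
-- stated objective: alternative
-- what changed: B builds the strict lower-triangle matrix L padded with zeros and returns the elementwise sum L + transpose(L), instead of A's three in-place phases (zero-fill a square matrix, write the upper triangle from graph[j][i], then mirror it into the lower triangle).
import Mathlib
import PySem

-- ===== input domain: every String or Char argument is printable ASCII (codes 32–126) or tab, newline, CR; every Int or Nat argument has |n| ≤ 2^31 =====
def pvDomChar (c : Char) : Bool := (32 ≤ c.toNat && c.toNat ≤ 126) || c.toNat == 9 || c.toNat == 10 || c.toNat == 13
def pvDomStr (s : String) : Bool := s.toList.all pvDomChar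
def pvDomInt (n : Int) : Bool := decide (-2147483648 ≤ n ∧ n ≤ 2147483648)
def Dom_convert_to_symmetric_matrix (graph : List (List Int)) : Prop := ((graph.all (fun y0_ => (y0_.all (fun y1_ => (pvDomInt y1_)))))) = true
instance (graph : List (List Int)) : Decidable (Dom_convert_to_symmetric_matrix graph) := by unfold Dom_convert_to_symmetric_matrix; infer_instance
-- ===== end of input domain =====

-- B builds the zero-padded strict lower triangle L and returns L + transpose(L) elementwise,
-- instead of A's three in-place phases (objective: alternative).

-- ===== PORT A =====
-- Literal port of A. graph[j][i] is read as (graph.getD j []).getD i 0; this is exact under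
-- Pre_ (both indices are nonnegative and in range there; outside Pre_ the Python raises).
def convert_to_symmetric_matrix (graph : List (List Int)) : List (List Int) :=
  let n := graph.length
  -- symmetric_matrix = [[0] * n for _ in range(n)]
  let sym0 : List (List Int) := (List.range n).map (fun _ => List.replicate n 0)
  -- for i in range(n): for j in range(i+1, n): symmetric_matrix[i][j] = graph[j][i]
  let sym1 := (List.range n).foldl (fun m i =>
      (List.range' (i+1) (n - (i+1))).foldl (fun m j =>
        m.modify i (fun row => row.set j ((graph.getD j []).getD i 0))) m) sym0
  -- for i in range(n): for j in range(i+1, n): symmetric_matrix[j][i] = symmetric_matrix[i][j]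
  (List.range n).foldl (fun m i =>
      (List.range' (i+1) (n - (i+1))).foldl (fun m j =>
        m.modify j (fun row => row.set i ((m.getD i []).getD j 0))) m) sym1

-- ===== PORT B =====
-- Literal port of Source B. graph[i][j] is read as getD (exact under Pre_, where j < i ≤ row length).
-- zip(*lower): every row of `lower` has length n, so the transpose is column j ↦ the j-th entry
-- of every row (exact: Python's zip truncates at the shortest row, which has length n here).
def convert_to_symmetric_matrix_alt (graph : List (List Int)) : List (List Int) :=
  let n := graph.length
  let lower : List (List Int) := (List.range n).map (fun i =>
    (List.range n).map (fun j => if j < i then (graph.getD i []).getD j 0 else 0))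
  let transposed : List (List Int) :=
    if n = 0 then [] else (List.range n).map (fun j => lower.map (fun row => row.getD j 0))
  List.zipWith (fun row_l row_t => List.zipWith (fun a b => a + b) row_l row_t) lower transposed

-- ===== PRECONDITION & SPEC =====
-- Pre_ excludes exactly the inputs on which the Python A raises IndexError
-- (some row j shorter than j, so graph[j][i] fails); B raises there as well.
def Pre_convert_to_symmetric_matrix (graph : List (List Int)) : Prop :=
  ∀ j, j < graph.length → j ≤ (graph.getD j []).length
instance (graph : List (List Int)) : Decidable (Pre_convert_to_symmetric_matrix graph) := by
  unfold Pre_convert_to_symmetric_matrix; infer_instance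
def pvWitness_convert_to_symmetric_matrix : List (List Int) := [[0], [5, 0], [3, 4, 0]]

def Spec_convert_to_symmetric_matrix (graph : List (List Int)) (out : List (List Int)) : Prop := out = convert_to_symmetric_matrix_alt graph
instance (graph : List (List Int)) (out : List (List Int)) : Decidable (Spec_convert_to_symmetric_matrix graph out) := by unfold Spec_convert_to_symmetric_matrix; infer_instance

-- ===== CLAIM (what is proved, stated in full; the proofs are below) =====
def Claim_equal_convert_to_symmetric_matrix : Prop := ∀ (graph : List (List Int)), Dom_convert_to_symmetric_matrix graph → Pre_convert_to_symmetric_matrix graph → Spec_convert_to_symmetric_matrix graph (convert_to_symmetric_matrix graph)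

-- ===== LEMMAS AND PROOFS =====

-- Canonical "matrix as entry function" form used by the proof.
def pvMk (n : Nat) (e : Nat → Nat → Int) : List (List Int) :=
  (List.range n).map (fun i => (List.range n).map (fun j => e i j))

theorem pvMk_congr {n : Nat} {e e' : Nat → Nat → Int}
    (h : ∀ a b, a < n → b < n → e a b = e' a b) : pvMk n e = pvMk n e' := by
  apply List.ext_getElem
  · simp [pvMk]
  · intro a h1 h2
    simp only [pvMk, List.getElem_map, List.getElem_range]
    apply List.ext_getElem
    · simp
    · intro b hb1 hb2
      simp only [List.getElem_map, List.getElem_range]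
      exact h a b (by simpa [pvMk] using h1) (by simpa using hb1)

theorem pvMk_update {n : Nat} (e : Nat → Nat → Int) (i j : Nat) (v : Int) :
    (pvMk n e).modify i (fun row => row.set j v)
      = pvMk n (fun a b => if a = i ∧ b = j then v else e a b) := by
  apply List.ext_getElem
  · simp [pvMk]
  · intro a h1 h2
    rw [List.getElem_modify]
    simp only [pvMk, List.getElem_map, List.getElem_range]
    by_cases hai : i = a
    · subst hai
      rw [if_pos rfl]
      apply List.ext_getElem
      · simp
      · intro b hb1 hb2
        rw [List.getElem_set]
        simp only [List.getElem_map, List.getElem_range]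
        by_cases hbj : j = b
        · subst hbj; simp
        · rw [if_neg hbj]
          simp [Ne.symm hbj]
    · rw [if_neg hai]
      apply List.ext_getElem
      · simp
      · intro b hb1 hb2
        simp only [List.getElem_map, List.getElem_range]
        rw [if_neg (show ¬(a = i ∧ b = j) from fun h => hai h.1.symm)]

theorem pvMk_read {n : Nat} (e : Nat → Nat → Int) {i j : Nat} (hi : i < n) (hj : j < n) :
    ((pvMk n e).getD i []).getD j 0 = e i j := by
  have h1 : (pvMk n e).getD i [] = (List.range n).map (fun j => e i j) := by
    rw [List.getD_eq_getElem _ _ (show i < (pvMk n e).length by simpa [pvMk] using hi)]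
    simp [pvMk]
  rw [h1, List.getD_eq_getElem _ _ (by simpa using hj)]
  simp

-- Phase-1 inner loop: repeated writes into row i with values depending only on j.
theorem pvFold1 {n : Nat} (i : Nat) (v : Nat → Int) :
    ∀ (js : List Nat) (e : Nat → Nat → Int),
    js.foldl (fun m j => m.modify i (fun row => row.set j (v j))) (pvMk n e)
      = pvMk n (fun a b => if a = i ∧ b ∈ js then v b else e a b) := by
  intro js
  induction js with
  | nil => intro e; simp
  | cons j js ih =>
      intro e
      rw [List.foldl_cons, pvMk_update, ih]
      apply pvMk_congr
      intro a b _ _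
      by_cases hai : a = i
      · subst hai
        by_cases hbj : b = j
        · subst hbj; simp
        · by_cases hbjs : b ∈ js <;> simp [hbj, hbjs]
      · simp [hai]

-- Phase-2 inner loop: each write to cell (j, i) reads cell (i, j) of the current matrix,
-- a cell this loop never writes.
theorem pvFold2 {n : Nat} {i : Nat} (hi : i < n) :
    ∀ (js : List Nat) (e : Nat → Nat → Int), (∀ j ∈ js, i < j ∧ j < n) →
    js.foldl (fun m j => m.modify j (fun row => row.set i ((m.getD i []).getD j 0))) (pvMk n e)
      = pvMk n (fun a b => if b = i ∧ a ∈ js then e i a else e a b) := by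
  intro js
  induction js with
  | nil => intro e _; simp
  | cons j js ih =>
      intro e hjs
      obtain ⟨hij, hjn⟩ := hjs j (List.mem_cons_self ..)
      rw [List.foldl_cons, pvMk_read e hi hjn, pvMk_update,
          ih _ (fun a ha => hjs a (List.mem_cons_of_mem _ ha))]
      apply pvMk_congr
      intro a b _ _
      show (if b = i ∧ a ∈ js then (if i = j ∧ a = i then e i j else e i a)
            else (if a = j ∧ b = i then e i j else e a b))
         = (if b = i ∧ a ∈ j :: js then e i a else e a b)
      by_cases hbi : b = i
      · by_cases hajs : a ∈ js
        · rw [if_pos (show b = i ∧ a ∈ js from ⟨hbi, hajs⟩),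
              if_neg (show ¬(i = j ∧ a = i) from fun h => Nat.ne_of_lt hij h.1),
              if_pos (show b = i ∧ a ∈ j :: js from ⟨hbi, List.mem_cons_of_mem _ hajs⟩)]
        · by_cases haj : a = j
          · rw [if_neg (show ¬(b = i ∧ a ∈ js) from fun h => hajs h.2),
                if_pos (show a = j ∧ b = i from ⟨haj, hbi⟩),
                if_pos (show b = i ∧ a ∈ j :: js from ⟨hbi, by rw [haj]; exact List.mem_cons_self ..⟩),
                haj]
          · rw [if_neg (show ¬(b = i ∧ a ∈ js) from fun h => hajs h.2),
                if_neg (show ¬(a = j ∧ b = i) from fun h => haj h.1),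
                if_neg (show ¬(b = i ∧ a ∈ j :: js) from fun h => (List.mem_cons.1 h.2).elim haj hajs)]
      · rw [if_neg (show ¬(b = i ∧ a ∈ js) from fun h => hbi h.1),
            if_neg (show ¬(a = j ∧ b = i) from fun h => hbi h.2),
            if_neg (show ¬(b = i ∧ a ∈ j :: js) from fun h => hbi h.1)]

-- The read both ports perform on graph.
def pvG (graph : List (List Int)) (j i : Nat) : Int := (graph.getD j []).getD i 0

-- Entry function of the matrix after A's phase 1 (upper triangle filled).
def pvE1 (graph : List (List Int)) (n : Nat) (a b : Nat) : Int :=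
  if a < b ∧ b < n then pvG graph b a else 0

theorem pvPhase1 (graph : List (List Int)) (n : Nat) :
    ∀ (len s : Nat) (e : Nat → Nat → Int), s + len = n →
    (List.range' s len).foldl (fun m i =>
        (List.range' (i+1) (n - (i+1))).foldl (fun m j =>
          m.modify i (fun row => row.set j ((graph.getD j []).getD i 0))) m) (pvMk n e)
      = pvMk n (fun a b => if s ≤ a ∧ a < b ∧ b < n then pvG graph b a else e a b) := by
  intro len
  induction len with
  | zero =>
      intro s e hs
      rw [show List.range' s 0 = [] from rfl, List.foldl_nil]
      apply pvMk_congr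
      intro a b ha hb
      rw [if_neg (by omega)]
  | succ len ih =>
      intro s e hs
      have hmem : ∀ c, c ∈ List.range' (s+1) (n-(s+1)) ↔ s+1 ≤ c ∧ c < n := by
        intro c; rw [List.mem_range'_1]; omega
      rw [List.range'_succ, List.foldl_cons, pvFold1, ih (s+1) _ (by omega)]
      apply pvMk_congr
      intro a b ha hb
      show (if s+1 ≤ a ∧ a < b ∧ b < n then pvG graph b a
            else if a = s ∧ b ∈ List.range' (s+1) (n-(s+1)) then (graph.getD b []).getD s 0
            else e a b)
         = (if s ≤ a ∧ a < b ∧ b < n then pvG graph b a else e a b)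
      by_cases hC1 : s+1 ≤ a ∧ a < b ∧ b < n
      · rw [if_pos hC1, if_pos (show s ≤ a ∧ a < b ∧ b < n by omega)]
      · rw [if_neg hC1]
        by_cases hC2 : a = s ∧ b ∈ List.range' (s+1) (n - (s+1))
        · obtain ⟨ha1, hb2⟩ := hC2
          have hb3 := (hmem b).mp hb2
          rw [if_pos (show a = s ∧ b ∈ List.range' (s+1) (n-(s+1)) from ⟨ha1, hb2⟩),
              if_pos (show s ≤ a ∧ a < b ∧ b < n by omega), ha1]
          rfl
        · rw [if_neg hC2, if_neg ?_]
          rintro ⟨hsa, hab, hbn⟩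
          rcases Nat.eq_or_lt_of_le hsa with h | h
          · exact hC2 ⟨h.symm, (hmem b).mpr ⟨by omega, hbn⟩⟩
          · exact hC1 ⟨h, hab, hbn⟩

theorem pvPhase2 (graph : List (List Int)) (n : Nat) :
    ∀ (len s : Nat) (e : Nat → Nat → Int), s + len = n →
    (∀ a b, b < n → s ≤ b → e a b = pvE1 graph n a b) →
    (List.range' s len).foldl (fun m i =>
        (List.range' (i+1) (n - (i+1))).foldl (fun m j =>
          m.modify j (fun row => row.set i ((m.getD i []).getD j 0))) m) (pvMk n e)
      = pvMk n (fun a b => if s ≤ b ∧ b < a ∧ a < n then pvE1 graph n b a else e a b) := by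
  intro len
  induction len with
  | zero =>
      intro s e hs _
      rw [show List.range' s 0 = [] from rfl, List.foldl_nil]
      apply pvMk_congr
      intro a b ha hb
      rw [if_neg (by omega)]
  | succ len ih =>
      intro s e hs he
      have hsn : s < n := by omega
      have hmem : ∀ c, c ∈ List.range' (s+1) (n-(s+1)) ↔ s+1 ≤ c ∧ c < n := by
        intro c; rw [List.mem_range'_1]; omega
      rw [List.range'_succ, List.foldl_cons,
          pvFold2 hsn (List.range' (s+1) (n-(s+1))) e
            (fun j hj => by rw [hmem] at hj; omega)]
      have hcongr : pvMk n (fun a b => if b = s ∧ a ∈ List.range' (s+1) (n-(s+1)) then e s a else e a b)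
          = pvMk n (fun a b => if b = s ∧ s+1 ≤ a ∧ a < n then pvE1 graph n s a else e a b) := by
        apply pvMk_congr
        intro a b ha hb
        show (if b = s ∧ a ∈ List.range' (s+1) (n-(s+1)) then e s a else e a b)
           = (if b = s ∧ s+1 ≤ a ∧ a < n then pvE1 graph n s a else e a b)
        by_cases hbs : b = s ∧ a ∈ List.range' (s+1) (n-(s+1))
        · obtain ⟨hb1, ha2⟩ := hbs
          have ha3 := (hmem a).mp ha2
          rw [if_pos (show b = s ∧ a ∈ List.range' (s+1) (n-(s+1)) from ⟨hb1, ha2⟩),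
              if_pos (show b = s ∧ s+1 ≤ a ∧ a < n from ⟨hb1, ha3.1, ha3.2⟩),
              he s a ha3.2 (by omega)]
        · rw [if_neg hbs,
              if_neg (show ¬(b = s ∧ s+1 ≤ a ∧ a < n) from
                fun h => hbs ⟨h.1, (hmem a).mpr ⟨h.2.1, h.2.2⟩⟩)]
      rw [hcongr, ih (s+1) _ (by omega) ?_]
      · apply pvMk_congr
        intro a b ha hb
        show (if s+1 ≤ b ∧ b < a ∧ a < n then pvE1 graph n b a
              else if b = s ∧ s+1 ≤ a ∧ a < n then pvE1 graph n s a else e a b)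
           = (if s ≤ b ∧ b < a ∧ a < n then pvE1 graph n b a else e a b)
        by_cases hC1 : s+1 ≤ b ∧ b < a ∧ a < n
        · rw [if_pos hC1, if_pos (show s ≤ b ∧ b < a ∧ a < n by omega)]
        · rw [if_neg hC1]
          by_cases hC2 : b = s ∧ s+1 ≤ a ∧ a < n
          · obtain ⟨hb1, ha1, ha2⟩ := hC2
            rw [if_pos (show b = s ∧ s+1 ≤ a ∧ a < n from ⟨hb1, ha1, ha2⟩),
                if_pos (show s ≤ b ∧ b < a ∧ a < n by omega), hb1]
          · rw [if_neg hC2, if_neg ?_]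
            rintro ⟨hsb, hba, han⟩
            rcases Nat.eq_or_lt_of_le hsb with h | h
            · exact hC2 ⟨h.symm, by omega, han⟩
            · exact hC1 ⟨h, hba, han⟩
      · intro a b hb hsb
        show (if b = s ∧ s+1 ≤ a ∧ a < n then pvE1 graph n s a else e a b) = pvE1 graph n a b
        rw [if_neg (show ¬(b = s ∧ s+1 ≤ a ∧ a < n) from fun h => absurd h.1 (by omega)),
            he a b hb (by omega)]

-- A's result, as one entry function on pvMk.
theorem pvA_closed (graph : List (List Int)) :
    convert_to_symmetric_matrix graph
      = pvMk graph.length (fun a b =>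
          if 0 ≤ b ∧ b < a ∧ a < graph.length then pvE1 graph graph.length b a
          else pvE1 graph graph.length a b) := by
  have hsym0 : (List.range graph.length).map (fun _ => List.replicate graph.length (0:Int))
      = pvMk graph.length (fun _ _ => 0) := by
    apply List.ext_getElem
    · simp [pvMk]
    · intro i h1 h2
      simp only [pvMk, List.getElem_map]
      apply List.ext_getElem <;> simp
  have h1' : pvMk graph.length
        (fun a b => if 0 ≤ a ∧ a < b ∧ b < graph.length then pvG graph b a else (0:Int))
      = pvMk graph.length (pvE1 graph graph.length) := by
    apply pvMk_congr
    intro a b ha hb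
    show (if 0 ≤ a ∧ a < b ∧ b < graph.length then pvG graph b a else 0)
       = pvE1 graph graph.length a b
    unfold pvE1
    by_cases h : a < b ∧ b < graph.length
    · rw [if_pos (show 0 ≤ a ∧ a < b ∧ b < graph.length from ⟨Nat.zero_le _, h.1, h.2⟩),
          if_pos h]
    · rw [if_neg (show ¬(0 ≤ a ∧ a < b ∧ b < graph.length) from fun hh => h ⟨hh.2.1, hh.2.2⟩),
          if_neg h]
  show (List.range graph.length).foldl _
      ((List.range graph.length).foldl _
        ((List.range graph.length).map (fun _ => List.replicate graph.length (0:Int))))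
    = _
  rw [hsym0, List.range_eq_range',
      pvPhase1 graph graph.length graph.length 0 _ (by omega), h1',
      pvPhase2 graph graph.length graph.length 0 _ (by omega) (fun _ _ _ _ => rfl)]

-- The transpose step of B on a pvMk matrix.
theorem pvTranspose (n : Nat) (e : Nat → Nat → Int) :
    (List.range n).map (fun j => (pvMk n e).map (fun row => row.getD j 0))
      = pvMk n (fun a b => e b a) := by
  apply List.ext_getElem
  · simp [pvMk]
  · intro a h1 h2
    simp only [pvMk, List.getElem_map, List.map_map]
    apply List.ext_getElem
    · simp
    · intro b hb1 hb2
      simp only [List.getElem_map, List.getElem_range, Function.comp]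
      rw [List.getD_eq_getElem _ _ (show a < ((List.range n).map (fun j => e b j)).length by
            simpa using (by simpa [pvMk] using h1))]
      simp

-- Elementwise addition of two pvMk matrices.
theorem pvZipAdd (n : Nat) (e e' : Nat → Nat → Int) :
    List.zipWith (fun row_l row_t => List.zipWith (fun a b => a + b) row_l row_t)
        (pvMk n e) (pvMk n e')
      = pvMk n (fun a b => e a b + e' a b) := by
  apply List.ext_getElem
  · simp [pvMk]
  · intro a h1 h2
    rw [List.getElem_zipWith]
    simp only [pvMk, List.getElem_map, List.getElem_range]
    apply List.ext_getElem
    · simp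
    · intro b hb1 hb2
      rw [List.getElem_zipWith]
      simp

-- B's result, as one entry function on pvMk.
theorem pvB_closed (graph : List (List Int)) :
    convert_to_symmetric_matrix_alt graph
      = pvMk graph.length (fun a b =>
          (if b < a then pvG graph a b else 0) + (if a < b then pvG graph b a else 0)) := by
  unfold convert_to_symmetric_matrix_alt
  by_cases hn : graph.length = 0
  · simp [hn, pvMk]
  · show List.zipWith (fun row_l row_t => List.zipWith (fun a b => a + b) row_l row_t)
        (pvMk graph.length (fun i j => if j < i then pvG graph i j else 0))
        (if graph.length = 0 then [] else (List.range graph.length).map (fun j =>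
          (pvMk graph.length (fun i j => if j < i then pvG graph i j else 0)).map
            (fun row => row.getD j 0)))
      = _
    rw [if_neg hn, pvTranspose, pvZipAdd]

theorem pvA_eq_alt (graph : List (List Int)) :
    convert_to_symmetric_matrix graph = convert_to_symmetric_matrix_alt graph := by
  rw [pvA_closed, pvB_closed]
  apply pvMk_congr
  intro a b ha hb
  unfold pvE1
  rcases Nat.lt_trichotomy a b with h | rfl | h
  · rw [if_neg (by omega), if_pos (show a < b ∧ b < graph.length from ⟨h, hb⟩),
        if_neg (by omega), if_pos h]
    simp
  · simp
  · rw [if_pos (show 0 ≤ b ∧ b < a ∧ a < graph.length from ⟨Nat.zero_le _, h, ha⟩),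
        if_pos (show b < a ∧ a < graph.length from ⟨h, ha⟩),
        if_pos h, if_neg (by omega)]
    simp

-- ===== VERDICT (by name: the statement is the Claim_ definition above) =====
theorem convert_to_symmetric_matrix_spec : Claim_equal_convert_to_symmetric_matrix := by
  intro graph _ _
  exact pvA_eq_alt graph
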